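-- pv_equiv track=rewrite | github.com/hwan96-ai/salt-coding-test | hye0nc/프로그래머스/2/138476. 귤 고르기/귤 고르기.py | solution
-- ===== SOURCE A (Python) =====
-- from collections import Counter
--
-- def solution(k, tangerine):
--
--     counter = Counter(tangerine)
--
--     sorted_freq = sorted(counter.values(), reverse=True)
--
--     count = 0
--     for freq in sorted_freq:
--         k -= freq
--         count += 1
--         if k <= 0:
--             break
--     return count
-- ===== SOURCE B (Python) =====
-- from collections import Counter
--
-- def solution(k, tangerine):
--     counter = Counter(tangerine)
--     buckets = Counter(counter.values())
--     f = max(counter.values(), default=0)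
--     count = 0
--     while f >= 1:
--         for _ in range(buckets[f]):
--             k -= f
--             count += 1
--             if k <= 0:
--                 return count
--         f -= 1
--     return count
-- ===== Notes on version B (the rewrite author's own statement) =====
-- stated objective: alternative
-- what changed: B replaces sorting the frequency list by a counting-sort-style frequency-of-frequencies bucket map, walking bucket values downward from the maximum frequency instead of iterating a sorted list.
import Mathlib
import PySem

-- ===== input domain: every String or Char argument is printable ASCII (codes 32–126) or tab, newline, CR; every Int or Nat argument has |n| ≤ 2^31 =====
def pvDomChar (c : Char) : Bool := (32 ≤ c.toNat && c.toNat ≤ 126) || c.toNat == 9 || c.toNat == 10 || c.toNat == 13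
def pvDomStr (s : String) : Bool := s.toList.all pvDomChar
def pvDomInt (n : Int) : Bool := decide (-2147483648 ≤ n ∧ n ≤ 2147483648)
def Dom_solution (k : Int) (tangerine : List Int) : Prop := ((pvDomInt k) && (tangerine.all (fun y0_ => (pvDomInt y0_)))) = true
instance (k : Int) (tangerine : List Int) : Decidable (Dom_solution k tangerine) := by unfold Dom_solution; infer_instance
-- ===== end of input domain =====

-- B replaces sorting the frequency list by a frequency-of-frequencies bucket map walked
-- downward from the maximum frequency (alternative decomposition, same results).

-- ===== PORT A =====
-- 'for freq in sorted_freq: k -= freq; count += 1; if k <= 0: break'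
def solA_loop : List Int → Int → Int → Int
  | [], _, count => count
  | f :: rest, k, count =>
      let k' := k - f
      let count' := count + 1
      if k' ≤ 0 then count' else solA_loop rest k' count'

def solution (k : Int) (tangerine : List Int) : Int :=
  let counter := PySem.Dict.counter tangerine
  let sorted_freq := PySem.List.sorted counter.values (fun x => x) true
  solA_loop sorted_freq k 0

-- ===== PORT B =====
-- inner 'for _ in range(buckets[f]): k -= f; count += 1; if k <= 0: return count'
-- result: (returned?, k, count)
def solB_inner (f : Int) : Nat → Int → Int → Bool × Int × Int
  | 0, k, count => (false, k, count)
  | c + 1, k, count =>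
      let k' := k - f
      let count' := count + 1
      if k' ≤ 0 then (true, k', count') else solB_inner f c k' count'

-- outer 'while f >= 1: …; f -= 1'
def solB_outer (buckets : PySem.Dict Int Int) (f : Int) (k count : Int) : Int :=
  if h : f < 1 then count
  else
    let r := solB_inner f (buckets.getD f 0).toNat k count
    if r.1 then r.2.2 else solB_outer buckets (f - 1) r.2.1 r.2.2
termination_by f.toNat
decreasing_by omega

def solution_alt (k : Int) (tangerine : List Int) : Int :=
  let counter := PySem.Dict.counter tangerine
  let buckets := PySem.Dict.counter counter.values
  let f := (PySem.List.max? counter.values (fun x => x)).getD 0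
  solB_outer buckets f k 0

-- ===== PRECONDITION & SPEC =====
def Spec_solution (k : Int) (tangerine : List Int) (out : Int) : Prop := out = solution_alt k tangerine
instance (k : Int) (tangerine : List Int) (out : Int) : Decidable (Spec_solution k tangerine out) := by unfold Spec_solution; infer_instance

-- ===== CLAIM (what is proved, stated in full; the proofs are below) =====
def Claim_equal_solution : Prop := ∀ (k : Int) (tangerine : List Int), Dom_solution k tangerine → Spec_solution k tangerine (solution k tangerine)

-- ===== LEMMAS AND PROOFS =====

-- generic greedy run over a list of frequencies: (broke?, k, count)
def pvRun : List Int → Int → Int → Bool × Int × Int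
  | [], k, count => (false, k, count)
  | f :: rest, k, count =>
      let k' := k - f
      let count' := count + 1
      if k' ≤ 0 then (true, k', count') else pvRun rest k' count'

-- the descending bucket expansion [maxf copies] ++ … ++ [1 copies]
def pvLdown (g : Int → Nat) (f : Int) : List Int :=
  if f < 1 then [] else List.replicate (g f) f ++ pvLdown g (f - 1)
termination_by f.toNat
decreasing_by omega

theorem pvRun_solA (l : List Int) (k count : Int) :
    solA_loop l k count = (pvRun l k count).2.2 := by
  induction l generalizing k count with
  | nil => rfl
  | cons f rest ih =>
      simp only [solA_loop, pvRun]
      split <;> simp [ih]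

theorem pvRun_append (l₁ l₂ : List Int) (k count : Int) :
    pvRun (l₁ ++ l₂) k count =
      (let r := pvRun l₁ k count; if r.1 then r else pvRun l₂ r.2.1 r.2.2) := by
  induction l₁ generalizing k count with
  | nil => simp [pvRun]
  | cons f rest ih =>
      simp only [List.cons_append, pvRun]
      split <;> simp [ih]

theorem pvRun_replicate (f : Int) (c : Nat) (k count : Int) :
    solB_inner f c k count = pvRun (List.replicate c f) k count := by
  induction c generalizing k count with
  | zero => rfl
  | succ n ih =>
      simp only [solB_inner, List.replicate_succ, pvRun]
      split <;> simp [ih]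

theorem solB_outer_eq_run (buckets : PySem.Dict Int Int) (f : Int) (k count : Int) :
    solB_outer buckets f k count =
      (pvRun (pvLdown (fun x => (buckets.getD x 0).toNat) f) k count).2.2 := by
  induction hn : f.toNat using Nat.strong_induction_on generalizing f k count with
  | _ n ih =>
    by_cases h : f < 1
    · rw [solB_outer, pvLdown]
      rw [dif_pos h, if_pos h]
      rfl
    · rw [solB_outer, pvLdown]
      rw [dif_neg h, if_neg h]
      rw [pvRun_replicate, pvRun_append]
      rcases hr : pvRun (List.replicate (buckets.getD f 0).toNat f) k count with ⟨b, k', c'⟩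
      cases b
      · simp only [Bool.false_eq_true, if_false]
        exact ih (f - 1).toNat (by omega) (f - 1) k' c' rfl
      · simp

theorem pvLdown_mem (g : Int → Nat) (f x : Int) (hx : x ∈ pvLdown g f) : 1 ≤ x ∧ x ≤ f := by
  induction hn : f.toNat using Nat.strong_induction_on generalizing f with
  | _ n ih =>
    rw [pvLdown] at hx
    by_cases h : f < 1
    · rw [if_pos h] at hx; cases hx
    · rw [if_neg h, List.mem_append] at hx
      rcases hx with hx | hx
      · have := List.eq_of_mem_replicate hx; omega
      · have := ih (f - 1).toNat (by omega) (f - 1) hx rfl; omega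

theorem pvLdown_pairwise (g : Int → Nat) (f : Int) :
    (pvLdown g f).Pairwise (fun a b => b ≤ a) := by
  induction hn : f.toNat using Nat.strong_induction_on generalizing f with
  | _ n ih =>
    rw [pvLdown]
    by_cases h : f < 1
    · rw [if_pos h]; exact List.Pairwise.nil
    · rw [if_neg h]
      refine List.pairwise_append.mpr ⟨?_, ?_, ?_⟩
      · exact List.pairwise_replicate.mpr (by omega)
      · exact ih (f - 1).toNat (by omega) (f - 1) rfl
      · intro a ha b hb
        have h1 := List.eq_of_mem_replicate ha
        have h2 := pvLdown_mem g (f - 1) b hb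
        omega

theorem pvLdown_count (g : Int → Nat) (f x : Int) :
    (pvLdown g f).count x = if 1 ≤ x ∧ x ≤ f then g x else 0 := by
  induction hn : f.toNat using Nat.strong_induction_on generalizing f with
  | _ n ih =>
    rw [pvLdown]
    by_cases h : f < 1
    · rw [if_pos h]
      simp only [List.count_nil]
      split
      · omega
      · rfl
    · rw [if_neg h]
      simp only [List.count_append, List.count_replicate, beq_iff_eq]
      rw [ih (f - 1).toNat (by omega) (f - 1) rfl]
      by_cases hx : x = f
      · subst hx; split_ifs <;> omega
      · split_ifs <;> omega

-- every value of Counter(xs) is a positive occurrence count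
theorem pvCounter_values (xs : List Int) :
    (PySem.Dict.counter xs).values =
      (PySem.Set.ofList xs).map (fun v => (xs.count v : Int)) := by
  rw [PySem.Dict.values_eq_map_keys _ (PySem.Dict.nodup_keys_counter xs) 0,
      PySem.Dict.keys_counter]
  exact List.map_congr_left (fun v _ => PySem.Dict.getD_counter xs v)

theorem pvVals_pos (xs : List Int) (v : Int)
    (hv : v ∈ (PySem.Dict.counter xs).values) : 1 ≤ v := by
  rw [pvCounter_values] at hv
  rcases List.mem_map.mp hv with ⟨w, hw, rfl⟩
  have hw' : w ∈ xs := (PySem.Set.mem_ofList _ _).mp hw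
  have := List.count_pos_iff.mpr hw'
  omega

theorem pvLdown_eq_sorted (vals : List Int) (maxf : Int)
    (hpos : ∀ v ∈ vals, 1 ≤ v) (hmax : ∀ v ∈ vals, v ≤ maxf) :
    pvLdown (fun x => vals.count x) maxf = PySem.List.sorted vals (fun x => x) true := by
  have hperm : (pvLdown (fun x => vals.count x) maxf).Perm
      (PySem.List.sorted vals (fun x => x) true) := by
    rw [List.perm_iff_count]
    intro x
    rw [pvLdown_count]
    rw [(PySem.List.sorted_perm vals (fun x => x) true).count_eq]
    split
    · rfl
    · next hcond =>
        by_contra hne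
        have hx : x ∈ vals := List.count_pos_iff.mp (Nat.pos_of_ne_zero (fun h => hne h.symm))
        exact hcond ⟨hpos x hx, hmax x hx⟩
  have hs1 : (pvLdown (fun x => vals.count x) maxf).Pairwise (fun a b => b ≤ a) :=
    pvLdown_pairwise _ _
  have hs2 : (PySem.List.sorted vals (fun x => x) true).Pairwise (fun a b => b ≤ a) :=
    PySem.List.sorted_pairwise_rev vals (fun x => x)
  exact List.Perm.eq_of_pairwise (fun a b _ _ h1 h2 => le_antisymm h2 h1) hs1 hs2 hperm

theorem pvBuckets_getD (vals : List Int) (x : Int) :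
    ((PySem.Dict.counter vals).getD x 0).toNat = vals.count x := by
  rw [PySem.Dict.getD_counter]; simp

-- ===== VERDICT (by name: the statement is the Claim_ definition above) =====
theorem solution_spec : Claim_equal_solution := by
  intro k tangerine _
  unfold Spec_solution solution solution_alt
  simp only []
  set vals := (PySem.Dict.counter tangerine).values with hvals
  rw [pvRun_solA, solB_outer_eq_run]
  have hfun : (fun x => ((PySem.Dict.counter vals).getD x 0).toNat)
      = fun x => vals.count x := funext (fun x => pvBuckets_getD vals x)
  rw [hfun]
  have hmax : ∀ v ∈ vals, v ≤ (PySem.List.max? vals (fun x => x)).getD 0 := by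
    intro v hv
    cases hm : PySem.List.max? vals (fun x => x) with
    | none =>
        rw [PySem.List.max?_eq_none_iff] at hm
        rw [hm] at hv; cases hv
    | some m =>
        have := PySem.List.max?_isMax hm v hv
        simpa [hm] using this
  rw [pvLdown_eq_sorted vals ((PySem.List.max? vals (fun x => x)).getD 0)
      (fun v hv => pvVals_pos tangerine v hv) hmax]
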